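-- pv_equiv track=rewrite | github.com/Zhao-Weng/ddmin | ddmin.py | f
-- ===== SOURCE A (Python) =====
-- class Result:
--     Pass = 1
--     Fail = 2
--     Unresolved = 3
--
-- def f(d):
-- 	seen1, seen2, seen3 = False, False, False
-- 	for v in d:
-- 		if (v == 1):
-- 			seen1 = True
-- 		if (v == 7):
-- 			seen2 = True
-- 		if (v == 8):
-- 			seen3 = True
-- 	if (seen1 and seen2 and seen3):
-- 		return Result.Fail
-- 	else:
-- 		return Result.Pass
-- ===== SOURCE B (Python) =====
-- class Result:
--     Pass = 1
--     Fail = 2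
--     Unresolved = 3
--
-- def f(d):
--     lst = list(d)
--     return Result.Fail if (1 in lst and 7 in lst and 8 in lst) else Result.Pass
-- ===== Notes on version B (the rewrite author's own statement) =====
-- stated objective: idiomatic
-- what changed: Replaces the single flag-setting pass with three short-circuiting membership tests over the materialized list.
import Mathlib
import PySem

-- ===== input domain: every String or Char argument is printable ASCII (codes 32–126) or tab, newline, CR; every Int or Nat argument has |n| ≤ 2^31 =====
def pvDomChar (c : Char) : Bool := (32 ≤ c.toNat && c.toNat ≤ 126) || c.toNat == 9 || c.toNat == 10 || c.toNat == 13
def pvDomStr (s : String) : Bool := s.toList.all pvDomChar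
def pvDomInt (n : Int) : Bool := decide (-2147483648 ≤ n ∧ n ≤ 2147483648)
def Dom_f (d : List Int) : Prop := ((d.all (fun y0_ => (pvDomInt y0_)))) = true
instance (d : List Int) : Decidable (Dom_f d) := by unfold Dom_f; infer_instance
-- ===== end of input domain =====

-- B replaces A's single flag-setting pass with three membership tests over the list (idiomatic, same cost).
-- ===== PORT A =====
def f (d : List Int) : Int :=
  let st := d.foldl (fun (s : Bool × Bool × Bool) v =>
    (if v == 1 then true else s.1,
     if v == 7 then true else s.2.1,
     if v == 8 then true else s.2.2)) (false, false, false)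
  if st.1 && st.2.1 && st.2.2 then 2 else 1

-- ===== PORT B =====
def f_alt (d : List Int) : Int :=
  if d.contains 1 && d.contains 7 && d.contains 8 then 2 else 1

-- ===== PRECONDITION & SPEC =====
def Spec_f (d : List Int) (out : Int) : Prop := out = f_alt d
instance (d : List Int) (out : Int) : Decidable (Spec_f d out) := by unfold Spec_f; infer_instance

-- ===== CLAIM (what is proved, stated in full; the proofs are below) =====
def Claim_equal_f : Prop := ∀ (d : List Int), Dom_f d → Spec_f d (f d)

-- ===== LEMMAS AND PROOFS =====

-- ===== VERDICT (by name: the statement is the Claim_ definition above) =====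
theorem flags_eq (d : List Int) (a b c : Bool) :
    d.foldl (fun (s : Bool × Bool × Bool) v =>
      (if v == 1 then true else s.1,
       if v == 7 then true else s.2.1,
       if v == 8 then true else s.2.2)) (a, b, c)
    = (a || d.contains 1, b || d.contains 7, c || d.contains 8) := by
  induction d generalizing a b c with
  | nil => simp
  | cons x xs ih =>
      simp only [List.foldl_cons, List.contains_cons, ih, Prod.mk.injEq]
      refine ⟨?_, ?_, ?_⟩
      · by_cases h : x = 1
        · simp [h]
        · have h' : ((1:Int) == x) = false := by
            simp only [beq_eq_false_iff_ne, ne_eq]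
            exact fun e => h e.symm
          simp [h, h']
      · by_cases h : x = 7
        · simp [h]
        · have h' : ((7:Int) == x) = false := by
            simp only [beq_eq_false_iff_ne, ne_eq]
            exact fun e => h e.symm
          simp [h, h']
      · by_cases h : x = 8
        · simp [h]
        · have h' : ((8:Int) == x) = false := by
            simp only [beq_eq_false_iff_ne, ne_eq]
            exact fun e => h e.symm
          simp [h, h']

theorem f_spec : Claim_equal_f := by
  intro d _
  unfold Spec_f f f_alt
  rw [flags_eq]
  simp
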